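-- pv_equiv track=rewrite | github.com/iliyankalfov/Glasgow-University | Python/Numerical arrays/lifeparsers.py | parse_rle
-- ===== SOURCE A (Python) =====
-- def parse_rle(rle):
--     """Parse an RLE string"""
--     lines = rle.split("\n")
--     comments = []
--     positions = []
--     x = 0
--     y = 0
--
--
--     complete=False
--     for line in lines:
--         line = line.strip().rstrip()
--         if len(line)==0:
--             pass
--         elif complete:
--             comments.append(line)
--
--         elif line.startswith("#"):
--             # extract comment/owner
--             if complete or line[1] in "cCoOnN":
--                 comments.append(line[2:])
--             # get offsets
--             if line[1] in "pP":
--                 coords = line[2:]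
--                 try:
--                     x,y = [int(p) for p in coords.split()]
--                 except:
--                     pass
--
--         # skip any size line -- we don't need it
--         elif line.startswith("x"):
--             continue
--         else:
--             count = 0
--             for char in line:
--
--                 # repeat counts
--                 if char.isdigit():
--                     count *= 10
--                     count += int(char)
--
--                 # blanks
--                 if char in 'bB':
--                     if count!=0:
--                         x += int(count)
--                     else:
--                         x += 1
--                     count = 0
--
--                 # ons
--                 if char in 'oO':
--                     if count!=0:
--                         for i in range(count):
--                             positions.append((x,y))
--                             x += 1
--                     else:
--                         positions.append((x,y))
--                         x += 1
--                     count = 0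
--
--                 # newlines
--                 if char in '$':
--                     if count!=0:
--                         y += int(count)
--                     else:
--                         y += 1
--                     x = 0
--                     count = 0
--                 if char in '!':
--                     complete=True
--                     break
--
--     return positions, comments
-- ===== SOURCE B (Python) =====
-- def _tokens(line):
--     """Tokenize cell data into (count, tag) pairs; digits accumulate across
--     unknown characters, a trailing count with no tag is dropped."""
--     toks = []
--     count = 0
--     for ch in line:
--         if ch.isdigit():
--             count = count * 10 + int(ch)
--         elif ch in "bBoO$!":
--             toks.append((count, ch))
--             count = 0
--     return toks
--
--
-- def parse_rle(rle):
--     """Parse an RLE string"""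
--     lines = rle.split("\n")
--     positions = []
--     comments = []
--     x = y = 0
--     for idx, raw in enumerate(lines):
--         line = raw.strip()
--         if not line or line.startswith("x"):
--             continue
--         if line.startswith("#"):
--             tag = line[1]
--             if tag in "cCoOnN":
--                 comments.append(line[2:])
--             if tag in "pP":
--                 try:
--                     x, y = map(int, line[2:].split())
--                 except ValueError:
--                     pass
--             continue
--         done = False
--         for count, t in _tokens(line):
--             n = count or 1
--             if t in "bB":
--                 x += n
--             elif t in "oO":
--                 positions += [(x + i, y) for i in range(n)]
--                 x += n
--             elif t == "$":
--                 x, y = 0, y + n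
--             else:  # '!' ends the pattern
--                 done = True
--                 break
--         if done:
--             # everything after the terminator is comments
--             comments += [s for s in (l.strip() for l in lines[idx + 1:]) if s]
--             break
--     return positions, comments
-- ===== Notes on version B (the rewrite author's own statement) =====
-- stated objective: idiomatic
-- what changed: B drops A's 'complete' flag and char-by-char digit accumulator: each data line is tokenized into (count, tag) pairs and dispatched per token (emitting whole runs at once), and on the '!' terminator B exits the line loop early and collects all remaining nonempty stripped lines as comments in one comprehension instead of carrying a flag through every later iteration.
import Mathlib
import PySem

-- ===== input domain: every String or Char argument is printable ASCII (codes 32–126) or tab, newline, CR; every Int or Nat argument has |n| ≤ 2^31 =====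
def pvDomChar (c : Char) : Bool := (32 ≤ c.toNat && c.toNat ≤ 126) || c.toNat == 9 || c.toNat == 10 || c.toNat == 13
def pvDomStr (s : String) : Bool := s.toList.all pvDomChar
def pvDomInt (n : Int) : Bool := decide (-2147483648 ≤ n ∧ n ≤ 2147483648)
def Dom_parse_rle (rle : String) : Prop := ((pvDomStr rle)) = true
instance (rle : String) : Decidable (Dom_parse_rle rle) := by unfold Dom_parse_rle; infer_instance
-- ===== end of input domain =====

-- B tokenizes data lines into (count, tag) runs and, on '!', exits the line loop early,
-- collecting the remaining nonempty lines as comments at once (no 'complete' flag); same result.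


-- ===== PORT A =====
-- inner loop of A's else branch: char by char over the line, state (positions, x, y),
-- with the running repeat count; returns the new state and the 'complete' flag.
-- int(char) for an ASCII digit is ported by hand as c.toNat - 48 (exact on digits).
def pvAChars : List Char → Int → List (Int × Int) → Int → Int →
    (List (Int × Int)) × Int × Int × Bool
  | [], _count, pos, x, y => (pos, x, y, false)
  | c :: rest, count, pos, x, y =>
    let count := if PySem.Chars.isdigit c then count * 10 + ((c.toNat : Int) - 48) else count
    let (x, count) :=
      if c = 'b' ∨ c = 'B' then (if count ≠ 0 then (x + count, 0) else (x + 1, 0))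
      else (x, count)
    let (pos, x, count) :=
      if c = 'o' ∨ c = 'O' then
        (if count ≠ 0 then
          -- for i in range(count): positions.append((x,y)); x += 1
          let r := (PySem.List.pyRange 0 count 1).foldl
            (fun (s : List (Int × Int) × Int) _ => (s.1 ++ [(s.2, y)], s.2 + 1)) (pos, x)
          (r.1, r.2, 0)
        else (pos ++ [(x, y)], x + 1, 0))
      else (pos, x, count)
    let (y, x, count) :=
      if c = '$' then (if count ≠ 0 then (y + count, 0, 0) else (y + 1, 0, 0))
      else (y, x, count)
    if c = '!' then (pos, x, y, true)
    else pvAChars rest count pos x y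

-- A's else branch on one data line: run the char loop and rebuild the state
def pvACells (line : String) (comments : List String) (pos : List (Int × Int)) (x y : Int) :
    List String × List (Int × Int) × Int × Int × Bool :=
  match pvAChars line.toList 0 pos x y with
  | (pos2, x2, y2, complete2) => (comments, pos2, x2, y2, complete2)

-- dispatch on one (already stripped) line, A's branch order, on the state
-- (comments, positions, x, y, complete)
def pvALine (line : String) (s : List String × List (Int × Int) × Int × Int × Bool) :
    List String × List (Int × Int) × Int × Int × Bool :=
  match s with
  | (comments, pos, x, y, complete) =>
    if PySem.Str.len line = 0 then (comments, pos, x, y, complete)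
    else if complete then (comments ++ [line], pos, x, y, complete)
    else if PySem.Str.startswith line "#" then
      match PySem.Str.pyGet? line 1 with
      | none => (comments, pos, x, y, complete)  -- Python raises IndexError here (outside Pre_)
      | some c =>
        let comments2 :=
          if complete || ['c', 'C', 'o', 'O', 'n', 'N'].contains c then
            comments ++ [PySem.Str.slice line (some 2) none]
          else comments
        let xy :=
          if ['p', 'P'].contains c then
            -- try: x,y = [int(p) for p in coords.split()] except: pass
            match (PySem.Str.split₀ (PySem.Str.slice line (some 2) none)).mapM PySem.Int.ofStr? with
            | some [a, b] => (a, b)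
            | _ => (x, y)
          else (x, y)
        (comments2, pos, xy.1, xy.2, complete)
    else if PySem.Str.startswith line "x" then (comments, pos, x, y, complete)
    else pvACells line comments pos x y

-- one iteration of A's outer 'for line in lines' loop: line.strip().rstrip(), then dispatch
def pvAStep (s : List String × List (Int × Int) × Int × Int × Bool) (l : String) :
    List String × List (Int × Int) × Int × Int × Bool :=
  pvALine (PySem.Str.rstrip (PySem.Str.strip l)) s

def parse_rle (rle : String) : (List (Int × Int)) × List String :=
  -- rle.split("\n"): separator nonempty, split? is always some
  match ((PySem.Str.split? rle "\n").getD []).foldl pvAStep ([], [], 0, 0, false) with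
  | (comments, pos, _, _, _) => (pos, comments)

-- ===== PORT B =====
-- B's tokenizer: (count, tag) pairs; digits accumulate across unknown characters,
-- a trailing count with no tag is dropped. int(ch) ported as ch.toNat - 48 (exact on digits).
def pvBTokens : List Char → Int → List (Int × Char)
  | [], _count => []
  | c :: rest, count =>
    if PySem.Chars.isdigit c then pvBTokens rest (count * 10 + ((c.toNat : Int) - 48))
    else if ['b', 'B', 'o', 'O', '$', '!'].contains c then (count, c) :: pvBTokens rest 0
    else pvBTokens rest count

-- B's token dispatch over one data line: returns the new state and the 'done' flag
def pvBRun : List (Int × Char) → List (Int × Int) → Int → Int →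
    (List (Int × Int)) × Int × Int × Bool
  | [], pos, x, y => (pos, x, y, false)
  | (count, tag) :: rest, pos, x, y =>
    let n := if count ≠ 0 then count else 1
    if tag = 'b' ∨ tag = 'B' then pvBRun rest pos (x + n) y
    else if tag = 'o' ∨ tag = 'O' then
      pvBRun rest (pos ++ (PySem.List.pyRange 0 n 1).map (fun i => (x + i, y))) (x + n) y
    else if tag = '$' then pvBRun rest pos 0 (y + n)
    else (pos, x, y, true)  -- '!' ends the pattern

-- B's tail comprehension: [s for s in (l.strip() for l in lines[idx+1:]) if s]
def pvBTail (ls : List String) : List String :=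
  (ls.map PySem.Str.strip).filter (fun s => s != "")

-- B's outer loop, a recursion over the remaining lines (lines[idx+1:] is 'rest');
-- on the '!' terminator it returns at once with the tail comprehension appended.
def pvBLoop : List String → List (Int × Int) → List String → Int → Int →
    (List (Int × Int)) × List String
  | [], pos, comments, _, _ => (pos, comments)
  | raw :: rest, pos, comments, x, y =>
    let line := PySem.Str.strip raw
    if PySem.Str.len line = 0 ∨ PySem.Str.startswith line "x" then
      pvBLoop rest pos comments x y
    else if PySem.Str.startswith line "#" then
      match PySem.Str.pyGet? line 1 with
      | none => pvBLoop rest pos comments x y  -- Python raises IndexError here (outside Pre_)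
      | some tag =>
        let comments2 :=
          if ['c', 'C', 'o', 'O', 'n', 'N'].contains tag then
            comments ++ [PySem.Str.slice line (some 2) none]
          else comments
        let xy :=
          if ['p', 'P'].contains tag then
            -- try: x, y = map(int, line[2:].split()) except ValueError: pass
            match (PySem.Str.split₀ (PySem.Str.slice line (some 2) none)).mapM PySem.Int.ofStr? with
            | some [a, b] => (a, b)
            | _ => (x, y)
          else (x, y)
        pvBLoop rest pos comments2 xy.1 xy.2
    else
      match pvBRun (pvBTokens line.toList 0) pos x y with
      | (pos2, x2, y2, done) =>
        if done then (pos2, comments ++ pvBTail rest)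
        else pvBLoop rest pos2 comments x2 y2

def parse_rle_alt (rle : String) : (List (Int × Int)) × List String :=
  pvBLoop ((PySem.Str.split? rle "\n").getD []) [] [] 0 0

-- ===== PRECONDITION & SPEC =====
-- a data line that completes the pattern: nonempty after strip, not a '#' or 'x' line,
-- and containing the '!' terminator
def pvCompleter (l : String) : Bool :=
  let m := PySem.Str.strip l
  PySem.Str.len m ≠ 0 && !PySem.Str.startswith m "#" && !PySem.Str.startswith m "x"
    && m.toList.contains '!'

-- Pre_ excludes exactly the inputs on which Python raises: a line stripping to the bare "#"
-- (IndexError at line[1] in both A and B) that no completing data line precedes; a bare "#"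
-- AFTER the '!' terminator is an ordinary comment line and stays inside Pre_.
def Pre_parse_rle (rle : String) : Prop :=
  ∀ i < ((PySem.Str.split? rle "\n").getD []).length,
    PySem.Str.strip (((PySem.Str.split? rle "\n").getD []).getD i "") = "#" →
      ∃ j < i, pvCompleter (((PySem.Str.split? rle "\n").getD []).getD j "") = true
instance (rle : String) : Decidable (Pre_parse_rle rle) := by
  unfold Pre_parse_rle; infer_instance

def pvWitness_parse_rle : String := "#C glider\nx = 3, y = 3\nbo$2bo$3o!\n#"

def Spec_parse_rle (rle : String) (out : (List (Int × Int)) × List String) : Prop :=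
  out = parse_rle_alt rle
instance (rle : String) (out : (List (Int × Int)) × List String) :
    Decidable (Spec_parse_rle rle out) := by unfold Spec_parse_rle; infer_instance

-- ===== CLAIM (what is proved, stated in full; the proofs are below) =====
def Claim_equal_parse_rle : Prop :=
  ∀ (rle : String), Dom_parse_rle rle → Pre_parse_rle rle →
    Spec_parse_rle rle (parse_rle rle)

-- ===== LEMMAS AND PROOFS =====

-- A's inner 'for i in range(count)' append loop, in closed form
theorem pv_emit_eq (count : Int) (h : 0 ≤ count) (y : Int) :
    ∀ (pos : List (Int × Int)) (x : Int),
    ((PySem.List.pyRange 0 count 1).foldl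
        (fun (s : List (Int × Int) × Int) _ => (s.1 ++ [(s.2, y)], s.2 + 1)) (pos, x))
      = (pos ++ (PySem.List.pyRange 0 count 1).map (fun i => (x + i, y)), x + count) := by
  induction count, h using Int.le_induction with
  | base =>
    intro pos x
    rw [PySem.List.pyRange_one_eq_nil le_rfl]
    simp
  | succ n hn ih =>
    intro pos x
    rw [PySem.List.pyRange_one_succ_right hn, List.foldl_append, ih, List.map_append]
    simp [List.append_assoc]
    ring

theorem pv_digit_bounds (c : Char) (h : PySem.Chars.isdigit c = true) :
    48 ≤ c.toNat ∧ c.toNat ≤ 57 := by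
  simp only [PySem.Chars.isdigit, Bool.and_eq_true, decide_eq_true_eq] at h
  obtain ⟨h1, h2⟩ := h
  rw [Char.le_def, UInt32.le_iff_toNat_le] at h1 h2
  exact ⟨h1, h2⟩

theorem pv_digit_ne (c : Char) (h : PySem.Chars.isdigit c = true) :
    c ≠ 'b' ∧ c ≠ 'B' ∧ c ≠ 'o' ∧ c ≠ 'O' ∧ c ≠ '$' ∧ c ≠ '!' := by
  have hb := pv_digit_bounds c h
  refine ⟨?_, ?_, ?_, ?_, ?_, ?_⟩ <;> rintro rfl <;> revert hb <;> decide

theorem pv_pyRange_zero_one : PySem.List.pyRange 0 1 1 = [0] := by rfl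

theorem pv_dropWhile_idem (p : Char → Bool) (xs : List Char) :
    (xs.dropWhile p).dropWhile p = xs.dropWhile p := by
  induction xs with
  | nil => rfl
  | cons a t ih =>
    by_cases h : p a = true
    · simp [h, ih]
    · simp [h]

theorem pv_rstrip_strip (s : String) :
    PySem.Str.rstrip (PySem.Str.strip s) = PySem.Str.strip s := by
  simp [PySem.Str.rstrip, PySem.Str.strip, PySem.Chars.strip, PySem.Chars.rstrip,
    PySem.Chars.lstrip, pv_dropWhile_idem]

-- A's char loop equals B's tokenize-then-dispatch pass
theorem pv_inner_eq (cs : List Char) :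
    ∀ (count : Int) (pos : List (Int × Int)) (x y : Int), 0 ≤ count →
    pvAChars cs count pos x y = pvBRun (pvBTokens cs count) pos x y := by
  induction cs with
  | nil => intro count pos x y _; rfl
  | cons c rest ih =>
    intro count pos x y hc
    by_cases hd : PySem.Chars.isdigit c = true
    · obtain ⟨h1, h2, h3, h4, h5, h6⟩ := pv_digit_ne c hd
      have hbnd := pv_digit_bounds c hd
      rw [pvAChars, pvBTokens]
      simp only [hd, if_true, h1, h2, h3, h4, h5, h6, or_self, if_false]
      exact ih _ pos x y (by omega)
    · rw [pvAChars, pvBTokens]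
      simp only [hd, if_false, Bool.false_eq_true]
      by_cases hb : c = 'b' ∨ c = 'B'
      · have hmem : (['b', 'B', 'o', 'O', '$', '!'].contains c) = true := by
          rcases hb with rfl | rfl <;> decide
        have hno : ¬ (c = 'o' ∨ c = 'O') := by rcases hb with rfl | rfl <;> decide
        have hnd : c ≠ '$' := by rcases hb with rfl | rfl <;> decide
        have hne : c ≠ '!' := by rcases hb with rfl | rfl <;> decide
        simp only [hb, if_true, hmem, hno, hnd, hne, if_false, pvBRun]
        split_ifs with h0
        · exact ih 0 pos (x + count) y le_rfl
        · exact ih 0 pos (x + 1) y le_rfl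
      · by_cases ho : c = 'o' ∨ c = 'O'
        · have hmem : (['b', 'B', 'o', 'O', '$', '!'].contains c) = true := by
            rcases ho with rfl | rfl <;> decide
          have hnd : c ≠ '$' := by rcases ho with rfl | rfl <;> decide
          have hne : c ≠ '!' := by rcases ho with rfl | rfl <;> decide
          simp only [hb, ho, if_true, if_false, hmem, hnd, hne, pvBRun]
          split_ifs with h0
          · rw [pv_emit_eq count hc y pos x]
            exact ih 0 _ (x + count) y le_rfl
          · rw [pv_pyRange_zero_one]
            simp only [List.map_cons, List.map_nil, add_zero]
            exact ih 0 (pos ++ [(x, y)]) (x + 1) y le_rfl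
        · by_cases hdd : c = '$'
          · subst hdd
            simp only [hb, ho, if_false,
              show (['b','B','o','O','$','!'].contains '$') = true by decide, if_true, pvBRun]
            simp only [show ('$' = '!') = False by simp, if_false]
            split_ifs with h0
            · exact ih 0 pos 0 (y + count) le_rfl
            · exact ih 0 pos 0 (y + 1) le_rfl
          · by_cases hex : c = '!'
            · subst hex
              simp only [hb, ho, hdd, if_false,
                show (['b','B','o','O','$','!'].contains '!') = true by decide, if_true, pvBRun]
            · have hmem : (['b', 'B', 'o', 'O', '$', '!'].contains c) = false := by
                rcases not_or.mp hb with ⟨q1, q2⟩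
                rcases not_or.mp ho with ⟨q3, q4⟩
                simp [List.contains_eq_mem, q1, q2, q3, q4, hdd, hex]
              simp only [hb, ho, hdd, hex, if_false, hmem, Bool.false_eq_true]
              exact ih count pos x y hc

theorem pv_len_zero_iff (s : String) : PySem.Str.len s = 0 ↔ s.toList = [] := by
  simp [PySem.Str.len]

theorem pv_hash_not_x (line : String) (hh : PySem.Str.startswith line "#" = true) :
    PySem.Str.startswith line "x" = false := by
  rw [Bool.eq_false_iff]
  intro hx
  simp only [PySem.Str.startswith, PySem.Chars.startswith_iff] at hh hx
  rcases hh with ⟨t1, h1⟩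
  rcases hx with ⟨t2, h2⟩
  rw [show ("#".toList) = ['#'] from rfl] at h1
  rw [show ("x".toList) = ['x'] from rfl] at h2
  rw [← h1] at h2
  simp at h2

-- "" test used by B's filter
theorem pv_len_zero_iff_empty (s : String) : PySem.Str.len s = 0 ↔ s = "" := by
  rw [pv_len_zero_iff]
  constructor
  · intro h
    exact String.toList_inj.mp (by simpa using h)
  · intro h; simp [h]

-- once complete, A's remaining iterations just collect nonempty stripped lines,
-- which is B's tail comprehension
theorem pv_complete_eq (ls : List String) :
    ∀ (comments : List String) (pos : List (Int × Int)) (x y : Int),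
    ls.foldl pvAStep (comments, pos, x, y, true)
      = (comments ++ pvBTail ls, pos, x, y, true) := by
  induction ls with
  | nil => intro comments pos x y; simp [pvBTail]
  | cons l rest ih =>
    intro comments pos x y
    rw [List.foldl_cons]
    have hstep : pvAStep (comments, pos, x, y, true) l
        = (if PySem.Str.len (PySem.Str.strip l) = 0 then (comments, pos, x, y, true)
           else (comments ++ [PySem.Str.strip l], pos, x, y, true)) := by
      unfold pvAStep
      rw [pv_rstrip_strip]
      unfold pvALine
      split_ifs with h0 <;> rfl
    rw [hstep]
    by_cases h0 : PySem.Str.len (PySem.Str.strip l) = 0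
    · have he : PySem.Str.strip l = "" := (pv_len_zero_iff_empty _).mp h0
      rw [if_pos h0, ih]
      have : pvBTail (l :: rest) = pvBTail rest := by
        simp [pvBTail, he]
      rw [this]
    · have he : ¬ PySem.Str.strip l = "" := fun h => h0 ((pv_len_zero_iff_empty _).mpr h)
      rw [if_neg h0, ih]
      have : pvBTail (l :: rest) = PySem.Str.strip l :: pvBTail rest := by
        simp [pvBTail, he]
      rw [this]
      simp

-- the main loop invariant: A's fold from a not-yet-complete state projects to B's recursion
theorem pv_main_eq (ls : List String) :
    ∀ (comments : List String) (pos : List (Int × Int)) (x y : Int),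
    ((ls.foldl pvAStep (comments, pos, x, y, false)).2.1,
      (ls.foldl pvAStep (comments, pos, x, y, false)).1)
      = pvBLoop ls pos comments x y := by
  induction ls with
  | nil => intro comments pos x y; rfl
  | cons l rest ih =>
    intro comments pos x y
    rw [List.foldl_cons]
    have hstepA : pvAStep (comments, pos, x, y, false) l
        = pvALine (PySem.Str.strip l) (comments, pos, x, y, false) := by
      unfold pvAStep; rw [pv_rstrip_strip]
    rw [hstepA]
    rw [pvBLoop]
    have hfalse : ¬ (false = true) := by simp
    by_cases h0 : PySem.Str.len (PySem.Str.strip l) = 0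
    · rw [pvALine]
      rw [if_pos h0, if_pos (Or.inl h0)]
      exact ih comments pos x y
    · by_cases hh : PySem.Str.startswith (PySem.Str.strip l) "#" = true
      · have hx := pv_hash_not_x _ hh
        have hx' : ¬ PySem.Str.startswith (PySem.Str.strip l) "x" = true := by
          rw [hx]; exact hfalse
        rw [pvALine]
        rw [if_neg h0, if_neg hfalse, if_pos hh,
          if_neg (by exact fun hor => hor.elim h0 hx'), if_pos hh]
        cases hg : PySem.Str.pyGet? (PySem.Str.strip l) 1 with
        | none => exact ih comments pos x y
        | some c => exact ih _ pos _ _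
      · by_cases hx : PySem.Str.startswith (PySem.Str.strip l) "x" = true
        · rw [pvALine]
          rw [if_neg h0, if_neg hfalse, if_neg hh, if_pos hx, if_pos (Or.inr hx)]
          exact ih comments pos x y
        · rw [pvALine]
          rw [if_neg h0, if_neg hfalse, if_neg hh, if_neg hx,
            if_neg (by exact fun hor => hor.elim h0 hx), if_neg hh]
          unfold pvACells
          rw [pv_inner_eq _ 0 pos x y le_rfl]
          cases hr : pvBRun (pvBTokens (PySem.Str.strip l).toList 0) pos x y with
          | mk pos2 s2 =>
            obtain ⟨x2, y2, done⟩ := s2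
            cases done with
            | false => exact ih comments pos2 x2 y2
            | true =>
              dsimp only
              rw [pv_complete_eq]
              rfl

-- ===== VERDICT (by name: the statement is the Claim_ definition above) =====
theorem parse_rle_spec : Claim_equal_parse_rle := by
  intro rle _hdom _hpre
  unfold Spec_parse_rle parse_rle parse_rle_alt
  rw [← pv_main_eq]
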